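-- pv_equiv track=rewrite | github.com/sjtu-epcc/arena | runtime/jaxpr/preprocess.py | get_stage_layer_ids_uniform
-- ===== SOURCE A (Python) =====
-- def get_stage_layer_ids_uniform(forward_stage_num: int, layer_num: int):
--     """
--     Get the list of stage layer ids and stage-to-mesh mapping, considering forward and backward stages.
--     --------------------------------------------------------------
--     Note:
--         - Within homogenous hardwares, we assume uniform slicing of layers into stages.
--     """
--     assert layer_num % forward_stage_num == 0
--     layer_num_per_stage = layer_num // forward_stage_num
--     forward_stage_layer_ids = [[_i + _j * layer_num_per_stage for _i in range(layer_num_per_stage)] for _j in range(forward_stage_num)]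
--     backward_stage_layer_ids = [[2 * layer_num - 1 - _i for _i in reversed(layer_ids)] for layer_ids in reversed(forward_stage_layer_ids)]
--     # Layer ids in each stage
--     stage_layer_ids = forward_stage_layer_ids + backward_stage_layer_ids
--     # Mapping from stage to mesh
--     stage_to_mesh = list(range(forward_stage_num)) + list(reversed(range(forward_stage_num)))
--     return stage_layer_ids, stage_to_mesh
-- ===== SOURCE B (Python) =====
-- def get_stage_layer_ids_uniform(forward_stage_num: int, layer_num: int):
--     """Same result as A: the forward blocks and their mirrored backward blocks are
--     exactly the 2*forward_stage_num consecutive blocks of size layer_num_per_stage,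
--     so build them all in one flat pass with range()."""
--     assert layer_num % forward_stage_num == 0
--     layer_num_per_stage = layer_num // forward_stage_num
--     stage_layer_ids = [list(range(k * layer_num_per_stage, (k + 1) * layer_num_per_stage))
--                        for k in range(2 * forward_stage_num)]
--     stage_to_mesh = list(range(forward_stage_num)) + list(range(forward_stage_num - 1, -1, -1))
--     return stage_layer_ids, stage_to_mesh
-- ===== Notes on version B (the rewrite author's own statement) =====
-- stated objective: simpler
-- what changed: B replaces the forward-blocks-then-mirrored-backward construction (nested comprehensions, two reversals and the 2*layer_num-1-i arithmetic) by one flat pass building 2*forward_stage_num consecutive blocks with range(), which is provably the same list since forward_stage_num*layer_num_per_stage == layer_num.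
import Mathlib
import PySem

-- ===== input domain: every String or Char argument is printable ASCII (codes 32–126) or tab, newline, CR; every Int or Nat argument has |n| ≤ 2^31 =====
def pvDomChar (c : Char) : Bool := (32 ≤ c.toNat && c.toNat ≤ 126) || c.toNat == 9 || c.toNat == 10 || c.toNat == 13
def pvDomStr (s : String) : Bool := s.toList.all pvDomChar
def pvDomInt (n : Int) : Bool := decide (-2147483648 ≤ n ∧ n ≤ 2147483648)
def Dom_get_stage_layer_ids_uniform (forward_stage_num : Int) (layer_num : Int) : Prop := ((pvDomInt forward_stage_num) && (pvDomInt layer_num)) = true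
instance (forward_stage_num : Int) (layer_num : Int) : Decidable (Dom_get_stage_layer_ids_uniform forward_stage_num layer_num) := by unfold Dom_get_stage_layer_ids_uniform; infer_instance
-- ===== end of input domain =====

-- B builds the 2*forward_stage_num consecutive blocks in one flat pass instead of
-- A's forward blocks plus mirrored backward blocks; objective: simpler.

-- ===== PORT A =====
def get_stage_layer_ids_uniform (forward_stage_num : Int) (layer_num : Int) : List (List Int) × List Int :=
  let layer_num_per_stage := PySem.Int.floordiv layer_num forward_stage_num
  let forward_stage_layer_ids :=
    (PySem.List.pyRange 0 forward_stage_num 1).map (fun j =>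
      (PySem.List.pyRange 0 layer_num_per_stage 1).map (fun i => i + j * layer_num_per_stage))
  let backward_stage_layer_ids :=
    forward_stage_layer_ids.reverse.map (fun layer_ids =>
      layer_ids.reverse.map (fun i => 2 * layer_num - 1 - i))
  let stage_layer_ids := forward_stage_layer_ids ++ backward_stage_layer_ids
  let stage_to_mesh :=
    PySem.List.pyRange 0 forward_stage_num 1 ++ (PySem.List.pyRange 0 forward_stage_num 1).reverse
  (stage_layer_ids, stage_to_mesh)

-- ===== PORT B =====
def get_stage_layer_ids_uniform_alt (forward_stage_num : Int) (layer_num : Int) : List (List Int) × List Int :=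
  let layer_num_per_stage := PySem.Int.floordiv layer_num forward_stage_num
  let stage_layer_ids :=
    (PySem.List.pyRange 0 (2 * forward_stage_num) 1).map (fun k =>
      PySem.List.pyRange (k * layer_num_per_stage) ((k + 1) * layer_num_per_stage) 1)
  let stage_to_mesh :=
    PySem.List.pyRange 0 forward_stage_num 1 ++ PySem.List.pyRange (forward_stage_num - 1) (-1) (-1)
  (stage_layer_ids, stage_to_mesh)

-- ===== PRECONDITION & SPEC =====
-- A raises (ZeroDivisionError if forward_stage_num == 0, AssertionError if layer_num is not
-- a multiple of forward_stage_num); B's assert raises on exactly the same inputs.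
def Pre_get_stage_layer_ids_uniform (forward_stage_num : Int) (layer_num : Int) : Prop :=
  forward_stage_num ≠ 0 ∧ PySem.Int.mod layer_num forward_stage_num = 0
instance (forward_stage_num : Int) (layer_num : Int) : Decidable (Pre_get_stage_layer_ids_uniform forward_stage_num layer_num) := by unfold Pre_get_stage_layer_ids_uniform; infer_instance

def pvWitness_get_stage_layer_ids_uniform : Int × Int := (2, 4)

def Spec_get_stage_layer_ids_uniform (forward_stage_num : Int) (layer_num : Int) (out : List (List Int) × List Int) : Prop := out = get_stage_layer_ids_uniform_alt forward_stage_num layer_num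
instance (forward_stage_num : Int) (layer_num : Int) (out : List (List Int) × List Int) : Decidable (Spec_get_stage_layer_ids_uniform forward_stage_num layer_num out) := by unfold Spec_get_stage_layer_ids_uniform; infer_instance

-- ===== CLAIM (what is proved, stated in full; the proofs are below) =====
def Claim_equal_get_stage_layer_ids_uniform : Prop := ∀ (forward_stage_num : Int) (layer_num : Int), Dom_get_stage_layer_ids_uniform forward_stage_num layer_num → Pre_get_stage_layer_ids_uniform forward_stage_num layer_num → Spec_get_stage_layer_ids_uniform forward_stage_num layer_num (get_stage_layer_ids_uniform forward_stage_num layer_num)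

-- ===== LEMMAS AND PROOFS =====

theorem pv_main (f L : Int) (_hf : f ≠ 0) (hmod : PySem.Int.mod L f = 0) :
    get_stage_layer_ids_uniform f L = get_stage_layer_ids_uniform_alt f L := by
  unfold get_stage_layer_ids_uniform get_stage_layer_ids_uniform_alt
  refine Prod.ext ?_ ?_
  · -- first component: forward blocks + mirrored backward blocks = 2f consecutive blocks
    show _ = (PySem.List.pyRange 0 (2 * f) 1).map _
    set q := PySem.Int.floordiv L f with hq
    clear_value q
    have hdm := PySem.Int.floordiv_mul_add_mod L f
    rw [hmod] at hdm
    have hL : q * f = L := by rw [hq]; omega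
    subst hL
    clear hdm hmod hq
    apply List.ext_getElem
    · simp [PySem.List.length_pyRange_one]
      omega
    intro k h1 h2
    have hk2 : k < (2 * f).toNat := by
      simpa [PySem.List.length_pyRange_one] using h2
    rw [List.getElem_map, PySem.List.getElem_pyRange_one]
    rw [show ((0:Int) + (k:Int) + 1) * q = ((0:Int) + (k:Int)) * q + q from by ring]
    by_cases hk : k < f.toNat
    · rw [List.getElem_append_left (by simp [PySem.List.length_pyRange_one]; omega)]
      rw [List.getElem_map, PySem.List.getElem_pyRange_one]
      apply List.ext_getElem
      · simp [PySem.List.length_pyRange_one]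
      intro i hi1 hi2
      rw [List.getElem_map, PySem.List.getElem_pyRange_one, PySem.List.getElem_pyRange_one]
      ring
    · have hfpos : 0 < f := by omega
      rw [List.getElem_append_right (by simp [PySem.List.length_pyRange_one]; omega)]
      simp only [List.length_map, PySem.List.length_pyRange_one]
      rw [List.getElem_map, List.getElem_reverse, List.getElem_map, PySem.List.getElem_pyRange_one]
      simp only [List.length_map, PySem.List.length_pyRange_one]
      apply List.ext_getElem
      · simp [PySem.List.length_pyRange_one]
      intro i hi1 hi2
      have hiq : i < (q - 0).toNat := by simpa [PySem.List.length_pyRange_one] using hi1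
      rw [List.getElem_map, List.getElem_reverse, List.getElem_map, PySem.List.getElem_pyRange_one,
          PySem.List.getElem_pyRange_one]
      simp only [List.length_map, PySem.List.length_pyRange_one]
      rw [show (((q - 0).toNat - 1 - i : ℕ) : Int) = q - 1 - (i : Int) from by omega]
      rw [show (((f - 0).toNat - 1 - (k - (f - 0).toNat) : ℕ) : Int) = 2 * f - 1 - (k : Int) from by omega]
      ring
  · -- second component: reversed(range(f)) = range(f-1, -1, -1)
    rw [PySem.List.pyRange_neg_one_eq_reverse]
    norm_num

-- ===== VERDICT (by name: the statement is the Claim_ definition above) =====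
theorem get_stage_layer_ids_uniform_spec : Claim_equal_get_stage_layer_ids_uniform := by
  intro f L _ hpre
  exact pv_main f L hpre.1 hpre.2
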